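-- pv_equiv track=rewrite | github.com/sl-m-lab/Internet-Argument-Corpus | v1/code/utilities/parsing/tokenizer.py | tokens_to_sentences
-- ===== SOURCE A (Python) =====
-- def tokens_to_sentences(tokens):
-- #TODO - once people upgrade nltk, use nltk's span option for sent tokenizing...
--     sentences = list()
--     sentence_buffer = list()
--     for token in tokens:
--         if len(token) == 0 or '\n' in token or token[-1] in ['.','?',':','!',';'] or '\0' in token:
--             sentence_buffer.append(token)
--             sentences.append(sentence_buffer)
--             sentence_buffer = list()
--         else:
--             sentence_buffer.append(token)
--     if len(sentence_buffer) > 0: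
--         sentences.append(sentence_buffer)
--     return sentences
-- ===== SOURCE B (Python) =====
-- def _is_break(token):
--     return (not token or '\n' in token
--             or token[-1] in '.?:!;' or '\0' in token)
--
--
-- def tokens_to_sentences(tokens):
--     # build the result back-to-front: both the sentence list and each
--     # sentence are kept reversed during the pass, and un-reversed at the end
--     rev = []
--     for token in reversed(tokens):
--         if _is_break(token) or not rev:
--             rev.append([token])
--         else:
--             rev[-1].append(token)
--     return [sentence[::-1] for sentence in reversed(rev)]
-- ===== Notes on version B (the rewrite author's own statement) =====
-- stated objective: alternative
-- what changed: B builds the sentence list back-to-front in one pass over the reversed token list, prepending each non-terminator token to the current first sentence, instead of A's forward loop with an explicit sentence buffer and a trailing flush.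
import Mathlib
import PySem

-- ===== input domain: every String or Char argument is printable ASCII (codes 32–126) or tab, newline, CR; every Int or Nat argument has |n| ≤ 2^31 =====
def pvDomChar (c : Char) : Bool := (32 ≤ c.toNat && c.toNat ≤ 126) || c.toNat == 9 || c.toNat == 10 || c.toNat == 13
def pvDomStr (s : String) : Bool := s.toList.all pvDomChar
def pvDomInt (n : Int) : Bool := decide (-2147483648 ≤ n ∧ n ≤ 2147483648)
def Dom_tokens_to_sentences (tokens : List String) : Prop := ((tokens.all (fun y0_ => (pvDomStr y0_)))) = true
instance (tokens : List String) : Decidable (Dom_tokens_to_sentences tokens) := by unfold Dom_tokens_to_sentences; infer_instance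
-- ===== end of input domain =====

-- B builds the sentence list back-to-front in one pass over the reversed token list instead of
-- A's forward loop with an explicit sentence buffer and trailing flush; alternative decomposition, same cost.

-- ===== PORT A =====
-- A's forward loop: state (sentences, sentence_buffer); flush buffer on terminator; trailing flush.
def tokens_to_sentences (tokens : List String) : List (List String) :=
  let st := tokens.foldl (fun (acc : List (List String) × List String) token =>
    let l := token.toList
    if l.length == 0 || l.contains '\n' ||
       (match PySem.List.pyGet? l (-1) with
        | some c => ['.', '?', ':', '!', ';'].contains c
        | none => false) ||
       l.contains (Char.ofNat 0)
    then (acc.1 ++ [acc.2 ++ [token]], [])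
    else (acc.1, acc.2 ++ [token])) ([], [])
  if st.2.length > 0 then st.1 ++ [st.2] else st.1

-- ===== PORT B =====
-- `_is_break(token)` of Source B
def pvIsBreak (token : String) : Bool :=
  let l := token.toList
  l == [] || l.contains '\n' ||
  (match PySem.List.pyGet? l (-1) with
   | some c => ['.', '?', ':', '!', ';'].contains c
   | none => false) ||
  l.contains (Char.ofNat 0)

-- loop over reversed(tokens); sentence list and each sentence kept reversed, undone at the end
def tokens_to_sentences_alt (tokens : List String) : List (List String) :=
  let rev := tokens.reverse.foldl (fun rev token =>
    if pvIsBreak token || rev.isEmpty then rev ++ [[token]]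
    else rev.dropLast ++ [rev.getLast! ++ [token]]) []
  rev.reverse.map (fun sentence => sentence.reverse)

-- ===== PRECONDITION & SPEC =====
def Spec_tokens_to_sentences (tokens : List String) (out : List (List String)) : Prop := out = tokens_to_sentences_alt tokens
instance (tokens : List String) (out : List (List String)) : Decidable (Spec_tokens_to_sentences tokens out) := by unfold Spec_tokens_to_sentences; infer_instance

-- ===== CLAIM (what is proved, stated in full; the proofs are below) =====
def Claim_equal_tokens_to_sentences : Prop := ∀ (tokens : List String), Dom_tokens_to_sentences tokens → Spec_tokens_to_sentences tokens (tokens_to_sentences tokens)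

-- ===== LEMMAS AND PROOFS =====

-- A's loop body, named for the proofs (definitionally the lambda in the port of A)
def pvAstep (acc : List (List String) × List String) (token : String) : List (List String) × List String :=
  let l := token.toList
  if l.length == 0 || l.contains '\n' ||
     (match PySem.List.pyGet? l (-1) with
      | some c => ['.', '?', ':', '!', ';'].contains c
      | none => false) ||
     l.contains (Char.ofNat 0)
  then (acc.1 ++ [acc.2 ++ [token]], [])
  else (acc.1, acc.2 ++ [token])

theorem pvAstep_eq (acc : List (List String) × List String) (token : String) :
    pvAstep acc token =
      if pvIsBreak token then (acc.1 ++ [acc.2 ++ [token]], []) else (acc.1, acc.2 ++ [token]) := by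
  unfold pvAstep pvIsBreak
  cases h : token.toList <;> simp

-- B as a right fold (the reversed-left-fold unrolled)
def pvBfold : List String → List (List String)
  | [] => []
  | t :: ts =>
    let s := pvBfold ts
    if pvIsBreak t || s.isEmpty then [t] :: s
    else ([t] ++ s.head!) :: s.tail

-- reading of B's reversed state: un-reverse both levels
def pvInterp (rev : List (List String)) : List (List String) :=
  rev.reverse.map (fun sentence => sentence.reverse)

theorem pvInterp_concat (rev : List (List String)) (s : List String) :
    pvInterp (rev ++ [s]) = s.reverse :: pvInterp rev := by
  simp [pvInterp]

theorem pvAlt_eq_Bfold (tokens : List String) :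
    tokens_to_sentences_alt tokens = pvBfold tokens := by
  unfold tokens_to_sentences_alt
  rw [List.foldl_reverse]
  show pvInterp _ = _
  induction tokens with
  | nil => rfl
  | cons t ts ih =>
    rw [List.foldr_cons]
    set r := List.foldr _ [] ts with hr
    simp only [pvBfold, ← ih]
    rcases List.eq_nil_or_concat r with h | ⟨r', y, h⟩
    · simp [h, pvInterp]
    · rw [List.concat_eq_append] at h
      rw [h] at ih ⊢
      have h2 : ∀ s : List String, pvInterp (r' ++ [y, s]) = s.reverse :: y.reverse :: pvInterp r' := by
        intro s; simp [pvInterp]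
      by_cases hb : pvIsBreak t = true
      · simp [hb, pvInterp_concat, h2]
      · simp only [Bool.not_eq_true] at hb
        simp [hb, pvInterp_concat]

-- attach a pending buffer to the front sentence of a result
def pvAttach (buf : List String) (s : List (List String)) : List (List String) :=
  match s with
  | [] => if buf.length > 0 then [buf] else []
  | x :: xs => (buf ++ x) :: xs

-- main invariant: A's loop from state (S, buf) equals S ++ (buf attached to B's result)
theorem pvA_inv (tokens : List String) :
    ∀ (S : List (List String)) (buf : List String),
      (let st := tokens.foldl pvAstep (S, buf)
       if st.2.length > 0 then st.1 ++ [st.2] else st.1)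
      = S ++ pvAttach buf (pvBfold tokens) := by
  induction tokens with
  | nil =>
    intro S buf
    simp only [List.foldl_nil, pvBfold, pvAttach]
    split <;> simp_all
  | cons t ts ih =>
    intro S buf
    simp only [List.foldl_cons, pvAstep_eq]
    by_cases hb : pvIsBreak t = true
    · rw [if_pos hb, ih]
      cases h : pvBfold ts <;> simp [pvBfold, pvAttach, hb, h]
    · rw [if_neg hb, ih]
      simp only [Bool.not_eq_true] at hb
      cases h : pvBfold ts <;> simp [pvBfold, pvAttach, hb, h]

-- ===== VERDICT (by name: the statement is the Claim_ definition above) =====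
theorem tokens_to_sentences_spec : Claim_equal_tokens_to_sentences := by
  intro tokens _
  unfold Spec_tokens_to_sentences
  rw [pvAlt_eq_Bfold]
  have hA : tokens_to_sentences tokens =
      (let st := tokens.foldl pvAstep ([], [])
       if st.2.length > 0 then st.1 ++ [st.2] else st.1) := rfl
  rw [hA, pvA_inv tokens [] []]
  cases h : pvBfold tokens <;> simp [pvAttach]
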